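-- pv_equiv track=rewrite | github.com/MatzeB/PyComparse | scripts/pytokenize.py | _split_string_literal
-- ===== SOURCE A (Python) =====
-- def _split_string_literal(raw):
--     quote_pos = -1
--     for i, ch in enumerate(raw):
--         if ch in ("'", '"'):
--             quote_pos = i
--             break
--     if quote_pos < 0:
--         return None
--
--     prefix = raw[:quote_pos]
--     quote = raw[quote_pos]
--     if raw.startswith(quote * 3, quote_pos):
--         return prefix, quote, raw[quote_pos + 3 : -3]
--     return prefix, quote, raw[quote_pos + 1 : -1]
-- ===== SOURCE B (Python) =====
-- def _split_string_literal(raw):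
--     prefix = []
--     rest = raw
--     while rest:
--         ch = rest[0]
--         if ch in ("'", '"'):
--             if rest[1:3] == ch + ch:
--                 return ''.join(prefix), ch, rest[3:-3]
--             return ''.join(prefix), ch, rest[1:-1]
--         prefix.append(ch)
--         rest = rest[1:]
--     return None
-- ===== Notes on version B (the rewrite author's own statement) =====
-- stated objective: alternative
-- what changed: Instead of scanning by index and slicing the whole string at absolute positions, B consumes the string as a (prefix accumulator, remainder) state machine: it peels characters into the prefix until the remainder starts with a quote, detects a triple quote by comparing the remainder's next two characters, and slices the content out of the remainder itself - no index arithmetic anywhere.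
import Mathlib
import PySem

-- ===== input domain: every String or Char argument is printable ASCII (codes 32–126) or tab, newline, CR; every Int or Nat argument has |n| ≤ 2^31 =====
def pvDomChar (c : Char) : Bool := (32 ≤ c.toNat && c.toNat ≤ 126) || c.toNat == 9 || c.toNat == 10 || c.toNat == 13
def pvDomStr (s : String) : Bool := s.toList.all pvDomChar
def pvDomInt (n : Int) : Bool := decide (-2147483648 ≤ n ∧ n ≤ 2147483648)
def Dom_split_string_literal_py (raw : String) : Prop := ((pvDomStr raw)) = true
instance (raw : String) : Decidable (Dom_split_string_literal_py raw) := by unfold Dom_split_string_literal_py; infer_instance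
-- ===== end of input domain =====

-- B consumes the string as a (prefix accumulator, remainder) state machine and slices the content
-- out of the remainder, instead of A's index scan with absolute slices of the whole string (alternative decomposition, same result).


-- ===== PORT A =====
-- the 'for i, ch in enumerate(raw): if ch in ("'", '"'): quote_pos = i; break' loop
def pvAFind : List Char → Nat → Int
  | [], _ => -1
  | ch :: rest, i => if ch = '\'' ∨ ch = '"' then (i : Int) else pvAFind rest (i + 1)

def split_string_literal_py (raw : String) : Option (String × String × String) :=
  let quote_pos := pvAFind raw.toList 0
  if quote_pos < 0 then none
  else
    let pre := PySem.Str.slice raw none (some quote_pos)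
    match PySem.Str.pyGet? raw quote_pos with
    | none => none  -- unreachable: quote_pos is a valid index of raw
    | some q =>
      if PySem.Chars.startswith (PySem.List.slice raw.toList (some quote_pos) none)
          (PySem.List.pyRepeat [q] 3) then
        some (pre, String.ofList [q], PySem.Str.slice raw (some (quote_pos + 3)) (some (-3)))
      else
        some (pre, String.ofList [q], PySem.Str.slice raw (some (quote_pos + 1)) (some (-1)))

-- ===== PORT B =====
-- Source B's 'while rest:' loop: state = (remainder, prefix accumulator); slices are taken from the remainder
def pvGoB : List Char → List Char → Option (String × String × String)
  | [], _ => none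
  | c :: t, pre =>
    if c = '\'' ∨ c = '"' then
      if PySem.List.slice (c :: t) (some 1) (some 3) = [c, c] then
        some (String.ofList pre, String.ofList [c],
              String.ofList (PySem.List.slice (c :: t) (some 3) (some (-3))))
      else
        some (String.ofList pre, String.ofList [c],
              String.ofList (PySem.List.slice (c :: t) (some 1) (some (-1))))
    else pvGoB t (pre ++ [c])

def split_string_literal_py_alt (raw : String) : Option (String × String × String) :=
  pvGoB raw.toList []

-- ===== PRECONDITION & SPEC =====
def Spec_split_string_literal_py (raw : String) (out : Option (String × String × String)) : Prop := out = split_string_literal_py_alt raw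
instance (raw : String) (out : Option (String × String × String)) : Decidable (Spec_split_string_literal_py raw out) := by unfold Spec_split_string_literal_py; infer_instance

-- ===== CLAIM =====
def Claim_equal_split_string_literal_py : Prop := ∀ (raw : String), Dom_split_string_literal_py raw → Spec_split_string_literal_py raw (split_string_literal_py raw)

-- ===== LEMMAS AND PROOFS =====

def pvIsQ (c : Char) : Bool := c = '\'' || c = '"'

lemma pvAFind_none (cs : List Char) (k : Nat) (h : ∀ c ∈ cs, pvIsQ c = false) :
    pvAFind cs k = -1 := by
  induction cs generalizing k with
  | nil => rfl
  | cons c t ih =>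
    have hc := h c (List.mem_cons_self)
    simp [pvIsQ] at hc
    simp [pvAFind, hc.1, hc.2]
    exact ih _ (fun x hx => h x (List.mem_cons_of_mem _ hx))

lemma pvAFind_some (cs : List Char) (k : Nat) (h : ∃ c ∈ cs, pvIsQ c = true) :
    pvAFind cs k = (k : Int) + ((cs.takeWhile (fun c => !pvIsQ c)).length : Int) := by
  induction cs generalizing k with
  | nil => simp at h
  | cons c t ih =>
    by_cases hq : pvIsQ c = true
    · have h1 : c = '\'' ∨ c = '"' := by
        simp [pvIsQ] at hq; rcases hq with h' | h' <;> [exact Or.inl h'; exact Or.inr h']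
      simp [pvAFind, h1, hq]
    · have h1 : ¬(c = '\'' ∨ c = '"') := by
        simp [pvIsQ] at hq; push Not; exact hq
      have ht : ∃ x ∈ t, pvIsQ x = true := by
        rcases h with ⟨x, hx, hxq⟩
        rcases List.mem_cons.mp hx with rfl | hx'
        · exact absurd hxq hq
        · exact ⟨x, hx', hxq⟩
      rw [show pvAFind (c :: t) k = pvAFind t (k + 1) by simp [pvAFind, h1]]
      rw [ih _ ht]
      simp [hq]
      omega

lemma pv_takeWhile_lt (cs : List Char) (p : Char → Bool) (h : ∃ c ∈ cs, p c = false) :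
    (cs.takeWhile p).length < cs.length := by
  rcases h with ⟨c, hc, hpc⟩
  have hpre : cs.takeWhile p <+: cs := List.takeWhile_prefix p
  rcases Nat.lt_or_ge (cs.takeWhile p).length cs.length with h' | h'
  · exact h'
  · exfalso
    have heq : cs.takeWhile p = cs := hpre.eq_of_length (Nat.le_antisymm hpre.length_le h')
    have := (List.takeWhile_eq_self_iff.mp heq) c hc
    simp [hpc] at this

-- B consumed the quote-free prefix u: the loop over u ++ v ends at v's head
lemma pvGoB_skip (u v pre : List Char) (h : ∀ c ∈ u, pvIsQ c = false) :
    pvGoB (u ++ v) pre = pvGoB v (pre ++ u) := by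
  induction u generalizing pre with
  | nil => simp
  | cons c t ih =>
    have hc := h c (List.mem_cons_self)
    have h1 : ¬(c = '\'' ∨ c = '"') := by
      simp [pvIsQ] at hc; push Not; exact hc
    simp only [List.cons_append, pvGoB, if_neg h1]
    rw [ih _ (fun x hx => h x (List.mem_cons_of_mem _ hx))]
    simp

-- content slices of the remainder equal the absolute slices A takes of the whole string
lemma pv_slice_drop (xs : List Char) (j w : Nat) (hw : 0 < w) :
    PySem.List.slice (xs.drop j) (some ((w : Nat) : Int)) (some (-((w : Nat) : Int)))
      = PySem.List.slice xs (some (((j : Nat) : Int) + ((w : Nat) : Int))) (some (-((w : Nat) : Int))) := by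
  unfold PySem.List.slice
  simp only
  rw [PySem.List.clampIdx_neg_natCast _ _ hw, PySem.List.clampIdx_neg_natCast _ _ hw]
  rw [PySem.List.clampIdx_natCast]
  rw [show (((j : Nat) : Int) + ((w : Nat) : Int)) = (((j + w : Nat) : Int)) by push_cast; ring]
  rw [PySem.List.clampIdx_natCast]
  rw [List.drop_drop, List.length_drop]
  by_cases h : j + w ≤ xs.length
  · have h1 : min w (xs.length - j) = w := by omega
    have h2 : min (j + w) xs.length = j + w := by omega
    rw [h1, h2]
    congr 1
    omega
  · have h1 : min w (xs.length - j) = xs.length - j := by omega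
    have h2 : min (j + w) xs.length = xs.length := by omega
    rw [h1, h2]
    have e1 : xs.length - j - w - (xs.length - j) = 0 := by omega
    have e2 : xs.length - w - xs.length = 0 := by omega
    rw [e1, e2]
    simp

lemma pv_tw_head (cs : List Char) (h : (cs.takeWhile (fun c => !pvIsQ c)).length < cs.length) :
    pvIsQ (cs[(cs.takeWhile (fun c => !pvIsQ c)).length]'h) = true := by
  induction cs with
  | nil => simp at h
  | cons c t ih =>
    rcases Bool.eq_false_or_eq_true (pvIsQ c) with hb | hb
    · simp [hb]
    · have h' : (List.takeWhile (fun c => !pvIsQ c) t).length < t.length := by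
        simp only [List.takeWhile_cons, hb, Bool.not_false, if_true, List.length_cons] at h
        omega
      simpa [hb] using ih h'

theorem split_string_literal_py_spec : Claim_equal_split_string_literal_py := by
  intro raw _
  unfold Spec_split_string_literal_py split_string_literal_py_alt
  by_cases hq : ∃ c ∈ raw.toList, pvIsQ c = true
  · set cs := raw.toList with hcs
    set j := (cs.takeWhile (fun c => !pvIsQ c)).length with hj
    have hjlt : j < cs.length := by
      rcases hq with ⟨c0, hc0, hc0q⟩
      exact pv_takeWhile_lt cs _ ⟨c0, hc0, by simp [hc0q]⟩
    have hA : pvAFind cs 0 = (j : Int) := by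
      rw [pvAFind_some cs 0 hq, hj]; simp
    have htw : cs.takeWhile (fun c => !pvIsQ c) = cs.take j := by
      have := (List.takeWhile_prefix (l := cs) (p := fun c => !pvIsQ c))
      rw [List.prefix_iff_eq_take.mp this, hj]
    have hdropcons : cs.drop j = cs[j] :: cs.drop (j + 1) := List.drop_eq_getElem_cons hjlt
    have hqj : pvIsQ cs[j] = true := pv_tw_head cs hjlt
    set q := cs[j] with hqdef
    set tt := cs.drop (j + 1) with htt
    have hu : ∀ c ∈ cs.take j, pvIsQ c = false := by
      intro c hc
      have hmem : c ∈ cs.takeWhile (fun c => !pvIsQ c) := htw ▸ hc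
      have := List.mem_takeWhile_imp hmem
      simpa using this
    -- B reduces to the branch at the quote
    have hB : pvGoB cs [] = pvGoB (q :: tt) (cs.take j) := by
      conv_lhs => rw [show cs = cs.take j ++ (q :: tt) by rw [← hdropcons]; exact (List.take_append_drop j cs).symm]
      rw [pvGoB_skip _ _ _ hu]
      simp
    have hqor : q = '\'' ∨ q = '"' := by
      simp [pvIsQ] at hqj
      rcases hqj with h' | h' <;> [exact Or.inl h'; exact Or.inr h']
    -- the two triple-quote tests agree
    have hcondB : PySem.List.slice (q :: tt) (some 1) (some 3) = tt.take 2 := by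
      unfold PySem.List.slice PySem.List.clampIdx
      simp only
      norm_num
      omega
    have hget : PySem.Str.pyGet? raw ((j : Nat) : Int) = some q := by
      rw [PySem.Str.pyGet?_natCast]
      rw [← hcs, List.getElem?_eq_getElem hjlt]
    have hcondA : PySem.Chars.startswith (PySem.List.slice cs (some ((j : Nat) : Int)) none)
        (PySem.List.pyRepeat [q] 3) = decide (tt.take 2 = [q, q]) := by
      rw [PySem.List.slice_from_natCast, hdropcons, PySem.List.pyRepeat_singleton]
      show List.isPrefixOf _ _ = _
      rw [show List.replicate (Int.toNat 3) q = [q, q, q] from rfl]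
      simp only [List.isPrefixOf, BEq.rfl, Bool.true_and]
      rcases Bool.eq_false_or_eq_true (List.isPrefixOf [q, q] tt) with hb | hb <;> rw [hb]
      · have hpre : [q, q] <+: tt := List.isPrefixOf_iff_prefix.mp hb
        have heq : List.take 2 tt = [q, q] := by
          simpa using (List.prefix_iff_eq_take.mp hpre).symm
        simp [heq]
      · symm
        simp only [decide_eq_false_iff_not]
        intro heq
        have hpre : [q, q] <+: tt := by
          rw [List.prefix_iff_eq_take]
          simpa using heq.symm
        rw [← List.isPrefixOf_iff_prefix, hb] at hpre
        exact Bool.false_ne_true hpre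
    -- prefix
    have hpref : PySem.Str.slice raw none (some ((j : Nat) : Int)) = String.ofList (cs.take j) := by
      rw [PySem.Str.slice]
      rw [PySem.Chars.slice_eq_listSlice, ← hcs, PySem.List.slice_to_natCast]
    -- contents
    have hcont3 : PySem.Str.slice raw (some (((j : Nat) : Int) + 3)) (some (-3))
        = String.ofList (PySem.List.slice (q :: tt) (some 3) (some (-3))) := by
      rw [PySem.Str.slice, PySem.Chars.slice_eq_listSlice, ← hcs, ← hdropcons]
      rw [show ((3 : Int)) = ((3 : Nat) : Int) by norm_num]
      rw [pv_slice_drop cs j 3 (by norm_num)]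
    have hcont1 : PySem.Str.slice raw (some (((j : Nat) : Int) + 1)) (some (-1))
        = String.ofList (PySem.List.slice (q :: tt) (some 1) (some (-1))) := by
      rw [PySem.Str.slice, PySem.Chars.slice_eq_listSlice, ← hcs, ← hdropcons]
      rw [show ((1 : Int)) = ((1 : Nat) : Int) by norm_num]
      rw [pv_slice_drop cs j 1 (by norm_num)]
    -- evaluate both sides
    rw [hB]
    simp only [split_string_literal_py, ← hcs, hA]
    rw [if_neg (by omega : ¬ ((j : Nat) : Int) < 0)]
    simp only [hget, hcondA, hpref]
    simp only [pvGoB, if_pos hqor, hcondB]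
    by_cases hc : List.take 2 tt = [q, q]
    · simp [hc, hcont3]
    · simp [hc, hcont1]
  · have hall : ∀ c ∈ raw.toList, pvIsQ c = false := by
      intro c hc
      rcases Bool.eq_false_or_eq_true (pvIsQ c) with h | h
      · exact absurd ⟨c, hc, h⟩ hq
      · exact h
    have hB : pvGoB raw.toList [] = none := by
      rw [show raw.toList = raw.toList ++ [] by simp, pvGoB_skip _ _ _ hall]
      rfl
    simp [split_string_literal_py, pvAFind_none raw.toList 0 hall, hB]
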